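-- pv_equiv track=rewrite | github.com/pypi-data/pypi-mirror-115 | packages/nalkinscloud-mqtt-python-client/nalkinscloud_mqtt_python_client-1.0.3-py3-none-any.whl/nalkinscloud_mqtt_python_client/mqtt_handler.py | is_valid_topic
-- ===== SOURCE A (Python) =====
-- def is_valid_topic(topic):
--     if type(topic) is not str:
--         return False
--
--     parsed_topic = topic.split('/')
--     for i in range(len(parsed_topic)):
--         if not parsed_topic[i]:  # Check if string inside each array cell is not null or empty
--             return False
--     return len(parsed_topic) == 3
-- ===== SOURCE B (Python) =====
-- def is_valid_topic(topic):
--     # Single left-to-right scan: count slashes and track current segment length,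
--     # instead of materialising the split list and index-looping over it.
--     if type(topic) is not str:
--         return False
--     slashes = 0
--     seg = 0
--     for ch in topic:
--         if ch == '/':
--             if seg == 0:
--                 return False
--             slashes += 1
--             seg = 0
--         else:
--             seg += 1
--     return slashes == 2 and seg > 0
-- ===== Notes on version B (the rewrite author's own statement) =====
-- stated objective: alternative
-- what changed: B replaces split('/') plus an index loop over the parts with a single character scan that counts separators and rejects an empty segment the moment it closes, allocating no intermediate list.
import Mathlib
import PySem

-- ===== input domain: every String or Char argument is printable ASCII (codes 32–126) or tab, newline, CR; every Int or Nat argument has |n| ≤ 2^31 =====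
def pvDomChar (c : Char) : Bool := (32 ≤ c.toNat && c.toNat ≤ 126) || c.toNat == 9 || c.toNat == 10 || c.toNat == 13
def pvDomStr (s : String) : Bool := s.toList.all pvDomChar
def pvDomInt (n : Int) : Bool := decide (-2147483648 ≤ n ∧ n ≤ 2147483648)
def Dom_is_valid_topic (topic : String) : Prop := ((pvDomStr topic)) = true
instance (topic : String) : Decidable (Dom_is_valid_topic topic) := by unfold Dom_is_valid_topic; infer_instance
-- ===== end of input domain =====

-- B replaces split('/') + an index loop over the parts by a single character scan
-- counting separators and segment length (objective: alternative, same O(n) cost).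

-- ===== PORT A =====
-- 'for i in range(len(parsed_topic)): if not parsed_topic[i]: return False' then 'return len == 3'
def pvLoopA (parsed : List (List Char)) (i : Nat) : Bool :=
  if h : i < parsed.length then
    if parsed[i].isEmpty then false else pvLoopA parsed (i + 1)
  else
    decide (parsed.length = 3)
termination_by parsed.length - i

def is_valid_topic (topic : String) : Bool :=
  -- type(topic) is str always holds under the String signature
  let parsed := PySem.Chars.splitOn topic.toList ['/']   -- topic.split('/')
  pvLoopA parsed 0

-- ===== PORT B =====
-- single scan: slashes = separators seen, seg = length of the current segment
def pvScanB : List Char → Nat → Nat → Bool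
  | [], slashes, seg => decide (slashes = 2 ∧ 0 < seg)
  | c :: rest, slashes, seg =>
    if c = '/' then
      if seg = 0 then false else pvScanB rest (slashes + 1) 0
    else
      pvScanB rest slashes (seg + 1)

def is_valid_topic_alt (topic : String) : Bool :=
  pvScanB topic.toList 0 0

-- ===== PRECONDITION & SPEC =====
def Spec_is_valid_topic (topic : String) (out : Bool) : Prop := out = is_valid_topic_alt topic
instance (topic : String) (out : Bool) : Decidable (Spec_is_valid_topic topic out) := by unfold Spec_is_valid_topic; infer_instance

-- ===== CLAIM (what is proved, stated in full; the proofs are below) =====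
def Claim_equal_is_valid_topic : Prop := ∀ (topic : String), Dom_is_valid_topic topic → Spec_is_valid_topic topic (is_valid_topic topic)

-- ===== LEMMAS AND PROOFS =====

-- reference split on '/' used only in the proofs
def pvParts : List Char → List (List Char)
  | [] => [[]]
  | c :: rest =>
    if c = '/' then [] :: pvParts rest
    else
      match pvParts rest with
      | [] => [[c]]
      | p :: ps => (c :: p) :: ps

lemma pvParts_ne_nil (l : List Char) : pvParts l ≠ [] := by
  cases l with
  | nil => simp [pvParts]
  | cons c rest =>
    simp only [pvParts]
    split
    · simp
    · split <;> simp

def pvConsHead (pre : List Char) (xs : List (List Char)) : List (List Char) :=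
  (pre ++ xs.headI) :: xs.tail

lemma pvBangIsEmpty (p : List Char) : (!p.isEmpty) = decide (0 < p.length) := by
  cases p <;> simp

lemma pvGo_eq (l : List Char) : ∀ (fuel : Nat) (cur : List Char) (acc : List (List Char)),
    l.length ≤ fuel →
    PySem.Chars.splitOn.go ['/'] fuel l cur acc = acc.reverse ++ pvConsHead cur.reverse (pvParts l) := by
  induction l with
  | nil =>
    intro fuel cur acc _
    cases fuel <;> simp [PySem.Chars.splitOn.go, pvConsHead, pvParts]
  | cons c rest ih =>
    intro fuel cur acc h
    cases fuel with
    | zero => simp at h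
    | succ f =>
      obtain ⟨p, ps, hrest⟩ : ∃ p ps, pvParts rest = p :: ps := by
        cases hr : pvParts rest with
        | nil => exact absurd hr (pvParts_ne_nil _)
        | cons p ps => exact ⟨p, ps, rfl⟩
      simp only [List.length_cons] at h
      by_cases hc : c = '/'
      · subst hc
        rw [PySem.Chars.splitOn.go]
        have hpre : List.isPrefixOf ['/'] ('/' :: rest) = true := by
          simp [List.isPrefixOf]
        rw [hpre, if_pos rfl]
        simp only [List.length_cons, List.length_nil, List.drop_succ_cons, List.drop_zero]
        rw [ih f [] (cur.reverse :: acc) (by omega)]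
        simp [pvConsHead, pvParts, hrest]
      · rw [PySem.Chars.splitOn.go]
        have hpre : List.isPrefixOf ['/'] (c :: rest) = false := by
          simp only [List.isPrefixOf, Bool.and_eq_false_iff, beq_eq_false_iff_ne, ne_eq]
          exact Or.inl fun h => hc h.symm
        rw [hpre, if_neg (by simp)]
        rw [ih f (c :: cur) acc (by omega)]
        simp [pvConsHead, pvParts, hrest, hc]

lemma pvSplitOn_eq (l : List Char) : PySem.Chars.splitOn l ['/'] = pvParts l := by
  rw [PySem.Chars.splitOn, pvGo_eq l (l.length + 1) [] [] (by omega)]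
  obtain ⟨p, ps, hl⟩ : ∃ p ps, pvParts l = p :: ps := by
    cases hr : pvParts l with
    | nil => exact absurd hr (pvParts_ne_nil _)
    | cons p ps => exact ⟨p, ps, rfl⟩
  simp [pvConsHead, hl]

lemma pvLoopA_eq (parsed : List (List Char)) (i : Nat) :
    pvLoopA parsed i = (((parsed.drop i).all fun p => !p.isEmpty) && decide (parsed.length = 3)) := by
  fun_induction pvLoopA parsed i with
  | case1 i h hempty =>
    rw [List.drop_eq_getElem_cons h, List.all_cons, hempty]
    simp
  | case2 i h hempty ih =>
    rw [ih, List.drop_eq_getElem_cons h, List.all_cons]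
    simp [hempty]
  | case3 i h =>
    have hd : parsed.drop i = [] := List.drop_eq_nil_of_le (by omega)
    simp [hd]

lemma pvScanB_eq (l : List Char) : ∀ (slashes seg : Nat),
    pvScanB l slashes seg =
      (decide (slashes + (pvParts l).length = 3) &&
        (decide (0 < seg + (pvParts l).headI.length) && (pvParts l).tail.all fun p => !p.isEmpty)) := by
  induction l with
  | nil =>
    intro slashes seg
    simp only [pvScanB, pvParts, List.length_cons, List.length_nil, List.headI, List.tail,
      List.all_nil, Bool.and_true, ← Bool.decide_and]
    exact decide_eq_decide.mpr (by omega)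
  | cons c rest ih =>
    intro slashes seg
    obtain ⟨p, ps, hrest⟩ : ∃ p ps, pvParts rest = p :: ps := by
      cases hr : pvParts rest with
      | nil => exact absurd hr (pvParts_ne_nil _)
      | cons p ps => exact ⟨p, ps, rfl⟩
    simp only [pvScanB, pvParts]
    by_cases hc : c = '/'
    · subst hc
      simp only [reduceIte]
      by_cases hs : seg = 0
      · subst hs
        simp [hrest]
      · rw [if_neg hs, ih]
        simp only [hrest, List.length_cons, List.length_nil, List.headI, List.tail, List.all_cons,
          pvBangIsEmpty]
        rw [show decide (slashes + 1 + (ps.length + 1) = 3) = decide (slashes + (ps.length + 1 + 1) = 3) from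
          decide_eq_decide.mpr (by omega)]
        have hpos : 0 < seg := Nat.pos_of_ne_zero hs
        simp [hpos, Bool.and_left_comm]
    · simp only [if_neg hc]
      rw [ih]
      simp only [hrest, List.length_cons, List.headI, List.tail, pvBangIsEmpty]
      rw [show seg + 1 + p.length = seg + (p.length + 1) from by omega]

-- ===== VERDICT (by name: the statement is the Claim_ definition above) =====
theorem is_valid_topic_spec : Claim_equal_is_valid_topic := by
  intro topic _
  unfold Spec_is_valid_topic is_valid_topic is_valid_topic_alt
  rw [pvSplitOn_eq, pvLoopA_eq, pvScanB_eq]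
  obtain ⟨p, ps, hp⟩ : ∃ p ps, pvParts topic.toList = p :: ps := by
    cases h : pvParts topic.toList with
    | nil => exact absurd h (pvParts_ne_nil _)
    | cons p ps => exact ⟨p, ps, rfl⟩
  rw [hp]
  simp only [List.drop_zero, List.length_cons, List.headI, List.tail, List.all_cons, pvBangIsEmpty,
    Nat.zero_add]
  simp [Bool.and_comm, Bool.and_left_comm]
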